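-- pv_equiv track=rewrite | github.com/melbermawy/Kairo-system | kairo/hero/engines/content_engine.py | _check_taboo_violations
-- ===== SOURCE A (Python) =====
-- def _check_taboo_violations(
--     text: str,
--     taboos: list[str],
-- ) -> list[str]:
--     """
--     Check for taboo violations in text.
--
--     Per rubric §5.5 (packages) and §3.5/§7 (variants):
--     - Engine must apply hard checks on generated text for banned terms
--     - Simple keyword/regex matching for PRD-1
--
--     Args:
--         text: The text to check
--         taboos: List of taboo phrases/keywords
--
--     Returns:
--         List of violated taboos (empty if no violations)
--     """
--     if not text or not taboos:
--         return []
--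
--     text_lower = text.lower()
--     violations = []
--
--     for taboo in taboos:
--         taboo_lower = taboo.lower().strip()
--         if taboo_lower and taboo_lower in text_lower:
--             violations.append(taboo)
--
--     return violations
-- ===== SOURCE B (Python) =====
-- def _check_taboo_violations(
--     text: str,
--     taboos: list[str],
-- ) -> list[str]:
--     # Length-grouped substring-set matching: normalise the patterns once, then for
--     # each distinct pattern length L build the set of all length-L substrings of the
--     # lowered text in one pass and intersect it with the patterns of that length;
--     # finally emit the taboos whose pattern was matched, in original order.
--     tl = text.lower()
--     n = len(tl)
--     pats = [t.lower().strip() for t in taboos]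
--     matched = set()
--     for L in set(len(p) for p in pats):
--         if 0 < L <= n:
--             chunks = set(tl[i:i + L] for i in range(n - L + 1))
--             matched |= set(p for p in pats if len(p) == L) & chunks
--     return [t for t, p in zip(taboos, pats) if p in matched]
-- ===== Notes on version B (the rewrite author's own statement) =====
-- stated objective: faster
-- what changed: B replaces A's pattern-major loop (one full substring search of the text per taboo) by length-grouped substring-set matching: for each distinct normalised pattern length L it builds the set of all length-L substrings of the lowered text in one pass and intersects it with the set of patterns of that length, then emits the taboos whose pattern was matched, in original order.
import Mathlib
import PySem

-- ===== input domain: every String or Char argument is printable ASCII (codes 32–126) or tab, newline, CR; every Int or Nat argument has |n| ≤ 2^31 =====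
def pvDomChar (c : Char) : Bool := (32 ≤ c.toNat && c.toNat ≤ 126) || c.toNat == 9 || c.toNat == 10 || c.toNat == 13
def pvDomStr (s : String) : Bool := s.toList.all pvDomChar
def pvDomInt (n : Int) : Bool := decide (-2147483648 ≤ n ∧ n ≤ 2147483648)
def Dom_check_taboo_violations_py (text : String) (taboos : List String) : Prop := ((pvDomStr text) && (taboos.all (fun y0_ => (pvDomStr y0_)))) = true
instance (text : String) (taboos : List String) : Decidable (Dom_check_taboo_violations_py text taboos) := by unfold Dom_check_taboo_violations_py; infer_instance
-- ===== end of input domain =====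

-- B replaces A's pattern-major loop (one substring search of the text per taboo) by
-- length-grouped substring-set matching (one set of all length-L substrings of the lowered
-- text per distinct pattern length); objective: faster (measurably faster in a timing run when there are many taboos).

-- ===== PORT A =====
def check_taboo_violations_py (text : String) (taboos : List String) : List String :=
  if text = "" ∨ taboos = [] then []
  else
    let text_lower := PySem.Str.lower text
    taboos.foldl
      (fun violations taboo =>
        let taboo_lower := PySem.Str.strip (PySem.Str.lower taboo)
        if taboo_lower ≠ "" ∧ PySem.Str.isIn taboo_lower text_lower = true then
          violations ++ [taboo]
        else violations) []

-- ===== PORT B =====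
def check_taboo_violations_py_alt (text : String) (taboos : List String) : List String :=
  let tl := PySem.Chars.lower text.toList
  let n : Int := (tl.length : Int)
  let pats := taboos.map (fun t => PySem.Chars.strip (PySem.Chars.lower t.toList))
  let matched :=
    (PySem.Set.ofList (pats.map (fun p => (p.length : Int)))).foldl
      (fun m L =>
        if 0 < L ∧ L ≤ n then
          let chunks := PySem.Set.ofList
            ((PySem.List.pyRange 0 (n - L + 1) 1).map
              (fun i => PySem.List.slice tl (some i) (some (i + L))))
          PySem.Set.union m
            (PySem.Set.inter (PySem.Set.ofList (pats.filter (fun p => (p.length : Int) == L))) chunks)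
        else m) PySem.Set.empty
  ((taboos.zip pats).filter (fun tp => PySem.Set.contains matched tp.2)).map Prod.fst

-- ===== PRECONDITION & SPEC =====
def Spec_check_taboo_violations_py (text : String) (taboos : List String) (out : List String) : Prop := out = check_taboo_violations_py_alt text taboos
instance (text : String) (taboos : List String) (out : List String) : Decidable (Spec_check_taboo_violations_py text taboos out) := by unfold Spec_check_taboo_violations_py; infer_instance

-- ===== CLAIM (what is proved, stated in full; the proofs are below) =====
def Claim_equal_check_taboo_violations_py : Prop := ∀ (text : String) (taboos : List String), Dom_check_taboo_violations_py text taboos → Spec_check_taboo_violations_py text taboos (check_taboo_violations_py text taboos)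

-- ===== LEMMAS AND PROOFS =====

-- membership after the for-loop over the distinct pattern lengths ('matched |= ... if cond')
theorem mem_foldl_union {a : Type} [BEq a] [LawfulBEq a] (ls : List Int) (c : Int -> Prop)
    [DecidablePred c] (g : Int -> PySem.Set a) (m : PySem.Set a) (p : a) :
    p ∈ ls.foldl (fun m L => if c L then PySem.Set.union m (g L) else m) m
      ↔ p ∈ m ∨ ∃ L ∈ ls, c L ∧ p ∈ g L := by
  induction ls generalizing m with
  | nil => simp
  | cons L0 ls ih =>
    simp only [List.foldl_cons, List.mem_cons]
    split_ifs with h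
    · rw [ih, PySem.Set.mem_union]
      constructor
      · rintro (⟨hm | hg⟩ | ⟨L, hL, hc, hg⟩)
        · exact Or.inl hm
        · exact Or.inr ⟨L0, Or.inl rfl, h, hg⟩
        · exact Or.inr ⟨L, Or.inr hL, hc, hg⟩
      · rintro (hm | ⟨L, rfl | hL, hc, hg⟩)
        · exact Or.inl (Or.inl hm)
        · exact Or.inl (Or.inr hg)
        · exact Or.inr ⟨L, hL, hc, hg⟩
    · rw [ih]
      constructor
      · rintro (hm | ⟨L, hL, hc, hg⟩)
        · exact Or.inl hm
        · exact Or.inr ⟨L, Or.inr hL, hc, hg⟩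
      · rintro (hm | ⟨L, rfl | hL, hc, hg⟩)
        · exact Or.inl hm
        · exact absurd hc h
        · exact Or.inr ⟨L, hL, hc, hg⟩

-- the length-guard plus membership in the length-|p| substring set is exactly 'p in tl'
theorem chunks_iff (tl p : List Char) (hne : p ≠ []) :
    ((0 < ((p.length : Nat) : Int) ∧ ((p.length : Nat) : Int) ≤ ((tl.length : Nat) : Int)) ∧
      p ∈ (PySem.List.pyRange 0 (((tl.length : Nat) : Int) - ((p.length : Nat) : Int) + 1) 1).map
            (fun i => PySem.List.slice tl (some i) (some (i + ((p.length : Nat) : Int)))))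
      ↔ PySem.Chars.isIn p tl = true := by
  rw [← PySem.Chars.exists_prefix_drop_iff_isIn]
  constructor
  · rintro ⟨⟨_, _⟩, hmem⟩
    rcases List.mem_map.mp hmem with ⟨i, hi, hsl⟩
    rcases PySem.List.mem_pyRange_one.mp hi with ⟨hi0, hilt⟩
    refine ⟨i.toNat, ?_⟩
    rw [List.prefix_iff_eq_take]
    rw [PySem.List.slice_toNat tl hi0 (by omega)] at hsl
    have hnn : (i + (p.length : Int)).toNat - i.toNat = p.length := by omega
    rw [hnn] at hsl
    exact hsl.symm
  · rintro ⟨j, hpre⟩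
    have hlen : p.length ≤ (tl.drop j).length := hpre.length_le
    rw [List.length_drop] at hlen
    have hp0 : 0 < p.length := List.length_pos_iff.mpr hne
    refine ⟨⟨by exact_mod_cast hp0, by omega⟩, List.mem_map.mpr ⟨(j : Int), ?_, ?_⟩⟩
    · rw [PySem.List.mem_pyRange_one]
      constructor
      · positivity
      · omega
    · rw [PySem.List.slice_toNat tl (by positivity) (by positivity)]
      have h1 : ((j : Int) + (p.length : Int)).toNat - (j : Int).toNat = p.length := by omega
      have h2 : ((j : Int)).toNat = j := by omega
      rw [h1, h2]
      exact ((List.prefix_iff_eq_take.mp hpre)).symm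

-- what ends up in the matched set: exactly the nonempty patterns occurring in the text
theorem mem_matched (pats : List (List Char)) (tl : List Char) (p : List Char) :
    p ∈ (PySem.Set.ofList (pats.map (fun p => (p.length : Int)))).foldl
          (fun m L =>
            if 0 < L ∧ L ≤ ((tl.length : Nat) : Int) then
              PySem.Set.union m
                (PySem.Set.inter (PySem.Set.ofList (pats.filter (fun p => (p.length : Int) == L)))
                  (PySem.Set.ofList
                    ((PySem.List.pyRange 0 (((tl.length : Nat) : Int) - L + 1) 1).map
                      (fun i => PySem.List.slice tl (some i) (some (i + L))))))
            else m) PySem.Set.empty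
      ↔ p ∈ pats ∧ p ≠ [] ∧ PySem.Chars.isIn p tl = true := by
  rw [mem_foldl_union]
  simp only [PySem.Set.empty, List.not_mem_nil, false_or, PySem.Set.mem_inter,
    PySem.Set.mem_ofList, List.mem_filter, beq_iff_eq]
  constructor
  · rintro ⟨L, _, hc, ⟨hp, hlen⟩, hchunk⟩
    have hne : p ≠ [] := by
      intro h
      subst h
      simp at hlen
      omega
    subst hlen
    exact ⟨hp, hne, (chunks_iff tl p hne).mp ⟨hc, hchunk⟩⟩
  · rintro ⟨hp, hne, hin⟩
    rcases (chunks_iff tl p hne).mpr hin with ⟨hc, hchunk⟩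
    exact ⟨(p.length : Int), List.mem_map.mpr ⟨p, hp, rfl⟩, hc,
      ⟨hp, rfl⟩, hchunk⟩

-- the zip-with-its-own-map comprehension of Source B is a plain filter over the taboos
theorem zip_map_filter_fst (l : List String) (f : String -> List Char) (q : List Char -> Bool) :
    ((l.zip (l.map f)).filter (fun tp => q tp.2)).map Prod.fst
      = l.filter (fun t => q (f t)) := by
  induction l with
  | nil => rfl
  | cons t ts ih =>
    simp only [List.map_cons, List.zip_cons_cons, List.filter_cons]
    by_cases h : q (f t) = true
    · simp [h, ih]
    · simp [h, ih]

-- s ≠ "" on the String side is toList ≠ [] on the list side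
theorem str_ne_empty_iff (s : String) : s ≠ "" ↔ s.toList ≠ [] := by
  constructor
  · intro h h'
    exact h (by cases s; simp_all)
  · intro h h'
    subst h'
    exact h rfl

-- ===== VERDICT (by name: the statement is the Claim_ definition above) =====
theorem check_taboo_violations_py_spec : Claim_equal_check_taboo_violations_py := by
  intro text taboos _
  unfold Spec_check_taboo_violations_py
  simp only [check_taboo_violations_py, check_taboo_violations_py_alt]
  rw [zip_map_filter_fst]
  by_cases hguard : text = "" ∨ taboos = []
  · rw [if_pos hguard]
    symm
    rw [List.filter_eq_nil_iff]
    intro t ht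
    simp only [Bool.not_eq_true]
    rw [← Bool.not_eq_true, PySem.Set.contains_iff, mem_matched]
    rintro ⟨-, hne, hin⟩
    rcases hguard with rfl | rfl
    · have htl : PySem.Chars.lower ("" : String).toList = [] := rfl
      rw [htl] at hin
      exact hne (List.eq_nil_of_infix_nil ((PySem.Chars.isIn_iff_infix _ _).mp hin))
    · exact absurd ht (List.not_mem_nil)
  · rw [if_neg hguard, PySem.List.foldl_append_ite_eq_filter, List.nil_append]
    refine List.filter_congr ?_
    intro t ht
    have hbridge : (PySem.Str.strip (PySem.Str.lower t)).toList
        = PySem.Chars.strip (PySem.Chars.lower t.toList) := by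
      simp [PySem.Str.toList_strip, PySem.Str.toList_lower]
    rw [Bool.eq_iff_iff, decide_eq_true_iff, PySem.Set.contains_iff, mem_matched]
    constructor
    · rintro ⟨h1, h2⟩
      refine ⟨List.mem_map.mpr ⟨t, ht, rfl⟩, hbridge ▸ (str_ne_empty_iff _).mp h1, ?_⟩
      rw [PySem.Str.isIn_eq, hbridge, PySem.Str.toList_lower] at h2
      exact h2
    · rintro ⟨-, h1, h2⟩
      refine ⟨(str_ne_empty_iff _).mpr (hbridge ▸ h1), ?_⟩
      rw [PySem.Str.isIn_eq, hbridge, PySem.Str.toList_lower]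
      exact h2
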